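-- pv_equiv track=rewrite | github.com/SanatKulkarni/hackrx-6.0 | final_codebase/query_generator.py | _generate_context_expansions
-- ===== SOURCE A (Python) =====
-- from typing import List
--
-- def _generate_context_expansions(question_lower: str, meaningful_words: List[str]) -> List[str]:
--     """Generate context-specific expansions based on detected domain and question type"""
--     expansions = []
--
--     # Time-related questions
--     if any(term in question_lower for term in ['period', 'time', 'duration', 'when', 'how long', 'days', 'months', 'years']):
--         for word in meaningful_words:
--             expansions.extend([
--                 f"{word} period", f"{word} duration", f"{word} time",
--                 f"{word} timeline", f"time for {word}", f"duration of {word}"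
--             ])
--
--     # Coverage/inclusion questions
--     if any(term in question_lower for term in ['cover', 'include', 'benefit', 'eligible', 'qualify']):
--         for word in meaningful_words:
--             expansions.extend([
--                 f"{word} coverage", f"{word} benefits", f"{word} included",
--                 f"covered {word}", f"{word} eligible", f"{word} qualification"
--             ])
--
--     # Exclusion/limitation questions
--     if any(term in question_lower for term in ['exclude', 'not cover', 'limitation', 'restrict']):
--         for word in meaningful_words:
--             expansions.extend([
--                 f"{word} exclusion", f"{word} limitation", f"{word} restriction",
--                 f"excluded {word}", f"{word} not covered", f"{word} restrictions"
--             ])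
--
--     # Cost/amount questions
--     if any(term in question_lower for term in ['cost', 'price', 'amount', 'fee', 'charge', 'pay']):
--         for word in meaningful_words:
--             expansions.extend([
--                 f"{word} cost", f"{word} price", f"{word} amount",
--                 f"{word} fee", f"cost of {word}", f"amount for {word}"
--             ])
--
--     # Process/procedure questions
--     if any(term in question_lower for term in ['how', 'process', 'procedure', 'step', 'method']):
--         for word in meaningful_words:
--             expansions.extend([
--                 f"{word} process", f"{word} procedure", f"{word} method",
--                 f"how to {word}", f"{word} steps", f"process for {word}"
--             ])
--
--     # Requirements/conditions questions
--     if any(term in question_lower for term in ['require', 'condition', 'criteria', 'need', 'must']):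
--         for word in meaningful_words:
--             expansions.extend([
--                 f"{word} requirements", f"{word} conditions", f"{word} criteria",
--                 f"required {word}", f"{word} needed", f"conditions for {word}"
--             ])
--
--     return expansions
-- ===== SOURCE B (Python) =====
-- from typing import List
--
-- # Recursive, back-to-front rewrite: rules live in one table whose templates are
-- # "{}"-placeholder strings filled in by str.replace; a recursive helper builds the
-- # tail of the answer first and prepends each matched block's comprehension.
-- _RULES = [
--     (("period", "time", "duration", "when", "how long", "days", "months", "years"),
--      ("{} period", "{} duration", "{} time", "{} timeline", "time for {}", "duration of {}")),
--     (("cover", "include", "benefit", "eligible", "qualify"),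
--      ("{} coverage", "{} benefits", "{} included", "covered {}", "{} eligible", "{} qualification")),
--     (("exclude", "not cover", "limitation", "restrict"),
--      ("{} exclusion", "{} limitation", "{} restriction", "excluded {}", "{} not covered", "{} restrictions")),
--     (("cost", "price", "amount", "fee", "charge", "pay"),
--      ("{} cost", "{} price", "{} amount", "{} fee", "cost of {}", "amount for {}")),
--     (("how", "process", "procedure", "step", "method"),
--      ("{} process", "{} procedure", "{} method", "how to {}", "{} steps", "process for {}")),
--     (("require", "condition", "criteria", "need", "must"),
--      ("{} requirements", "{} conditions", "{} criteria", "required {}", "{} needed", "conditions for {}")),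
-- ]
--
-- def _expand(rules, question_lower, meaningful_words):
--     if not rules:
--         return []
--     keywords, templates = rules[0]
--     rest = _expand(rules[1:], question_lower, meaningful_words)
--     if not any(k in question_lower for k in keywords):
--         return rest
--     return [t.replace("{}", w) for w in meaningful_words for t in templates] + rest
--
-- def _generate_context_expansions(question_lower: str, meaningful_words: List[str]) -> List[str]:
--     return _expand(_RULES, question_lower, meaningful_words)
-- ===== Notes on version B (the rewrite author's own statement) =====
-- stated objective: alternative
-- what changed: Replaces A's six hard-coded forward-accumulating if-blocks of f-strings with a recursive helper over a literal rules table that builds the result back-to-front and fills "{}"-placeholder templates via str.replace.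
import Mathlib
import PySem

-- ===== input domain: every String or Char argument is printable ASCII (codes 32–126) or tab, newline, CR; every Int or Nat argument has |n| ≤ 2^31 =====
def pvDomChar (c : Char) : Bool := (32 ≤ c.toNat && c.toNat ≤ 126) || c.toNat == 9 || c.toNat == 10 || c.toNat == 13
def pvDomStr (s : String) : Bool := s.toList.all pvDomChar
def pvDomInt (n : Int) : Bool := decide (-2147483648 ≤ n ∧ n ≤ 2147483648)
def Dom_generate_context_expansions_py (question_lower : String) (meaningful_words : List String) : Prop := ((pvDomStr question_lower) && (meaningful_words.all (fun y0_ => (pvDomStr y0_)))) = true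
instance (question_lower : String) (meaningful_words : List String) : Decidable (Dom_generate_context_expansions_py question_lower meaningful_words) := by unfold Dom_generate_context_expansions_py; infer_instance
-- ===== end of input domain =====

-- B rewrites A's six forward-accumulating if-blocks as a recursive back-to-front pass over a
-- rules table whose "{}"-placeholder templates are filled via str.replace; same output.

-- ===== PORT A =====
def generate_context_expansions_py (question_lower : String) (meaningful_words : List String) : List String :=
  let expansions : List String := []
  let expansions :=
    if (["period", "time", "duration", "when", "how long", "days", "months", "years"].any
        (fun term => PySem.Str.isIn term question_lower)) then
      meaningful_words.foldl (fun acc word => acc ++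
        [word ++ " period", word ++ " duration", word ++ " time",
         word ++ " timeline", "time for " ++ word, "duration of " ++ word]) expansions
    else expansions
  let expansions :=
    if (["cover", "include", "benefit", "eligible", "qualify"].any
        (fun term => PySem.Str.isIn term question_lower)) then
      meaningful_words.foldl (fun acc word => acc ++
        [word ++ " coverage", word ++ " benefits", word ++ " included",
         "covered " ++ word, word ++ " eligible", word ++ " qualification"]) expansions
    else expansions
  let expansions :=
    if (["exclude", "not cover", "limitation", "restrict"].any
        (fun term => PySem.Str.isIn term question_lower)) then
      meaningful_words.foldl (fun acc word => acc ++
        [word ++ " exclusion", word ++ " limitation", word ++ " restriction",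
         "excluded " ++ word, word ++ " not covered", word ++ " restrictions"]) expansions
    else expansions
  let expansions :=
    if (["cost", "price", "amount", "fee", "charge", "pay"].any
        (fun term => PySem.Str.isIn term question_lower)) then
      meaningful_words.foldl (fun acc word => acc ++
        [word ++ " cost", word ++ " price", word ++ " amount",
         word ++ " fee", "cost of " ++ word, "amount for " ++ word]) expansions
    else expansions
  let expansions :=
    if (["how", "process", "procedure", "step", "method"].any
        (fun term => PySem.Str.isIn term question_lower)) then
      meaningful_words.foldl (fun acc word => acc ++
        [word ++ " process", word ++ " procedure", word ++ " method",
         "how to " ++ word, word ++ " steps", "process for " ++ word]) expansions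
    else expansions
  let expansions :=
    if (["require", "condition", "criteria", "need", "must"].any
        (fun term => PySem.Str.isIn term question_lower)) then
      meaningful_words.foldl (fun acc word => acc ++
        [word ++ " requirements", word ++ " conditions", word ++ " criteria",
         "required " ++ word, word ++ " needed", "conditions for " ++ word]) expansions
    else expansions
  expansions

-- ===== PORT B =====
def pvRules : List (List String × List String) :=
  [(["period", "time", "duration", "when", "how long", "days", "months", "years"],
    ["{} period", "{} duration", "{} time", "{} timeline", "time for {}", "duration of {}"]),
   (["cover", "include", "benefit", "eligible", "qualify"],
    ["{} coverage", "{} benefits", "{} included", "covered {}", "{} eligible", "{} qualification"]),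
   (["exclude", "not cover", "limitation", "restrict"],
    ["{} exclusion", "{} limitation", "{} restriction", "excluded {}", "{} not covered", "{} restrictions"]),
   (["cost", "price", "amount", "fee", "charge", "pay"],
    ["{} cost", "{} price", "{} amount", "{} fee", "cost of {}", "amount for {}"]),
   (["how", "process", "procedure", "step", "method"],
    ["{} process", "{} procedure", "{} method", "how to {}", "{} steps", "process for {}"]),
   (["require", "condition", "criteria", "need", "must"],
    ["{} requirements", "{} conditions", "{} criteria", "required {}", "{} needed", "conditions for {}"])]

def pvExpand (rules : List (List String × List String)) (question_lower : String)
    (meaningful_words : List String) : List String :=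
  match rules with
  | [] => []
  | (keywords, templates) :: rs =>
    let rest := pvExpand rs question_lower meaningful_words
    if !(keywords.any (fun k => PySem.Str.isIn k question_lower)) then rest
    else (meaningful_words.flatMap (fun w =>
            templates.map (fun t => PySem.Str.replace t "{}" w))) ++ rest

def generate_context_expansions_py_alt (question_lower : String) (meaningful_words : List String) : List String :=
  pvExpand pvRules question_lower meaningful_words

-- ===== PRECONDITION & SPEC =====
def Spec_generate_context_expansions_py (question_lower : String) (meaningful_words : List String) (out : List String) : Prop := out = generate_context_expansions_py_alt question_lower meaningful_words
instance (question_lower : String) (meaningful_words : List String) (out : List String) : Decidable (Spec_generate_context_expansions_py question_lower meaningful_words out) := by unfold Spec_generate_context_expansions_py; infer_instance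

-- ===== CLAIM (what is proved, stated in full; the proofs are below) =====
def Claim_equal_generate_context_expansions_py : Prop := ∀ (question_lower : String) (meaningful_words : List String), Dom_generate_context_expansions_py question_lower meaningful_words → Spec_generate_context_expansions_py question_lower meaningful_words (generate_context_expansions_py question_lower meaningful_words)

-- ===== LEMMAS AND PROOFS =====

theorem pvR1 (w : String) : PySem.Str.replace "{} period" "{}" w = w ++ " period" := by
  simp [PySem.Str.replace, PySem.Chars.replace, PySem.Chars.replace.go, String.ext_iff]

theorem pvR2 (w : String) : PySem.Str.replace "{} duration" "{}" w = w ++ " duration" := by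
  simp [PySem.Str.replace, PySem.Chars.replace, PySem.Chars.replace.go, String.ext_iff]

theorem pvR3 (w : String) : PySem.Str.replace "{} time" "{}" w = w ++ " time" := by
  simp [PySem.Str.replace, PySem.Chars.replace, PySem.Chars.replace.go, String.ext_iff]

theorem pvR4 (w : String) : PySem.Str.replace "{} timeline" "{}" w = w ++ " timeline" := by
  simp [PySem.Str.replace, PySem.Chars.replace, PySem.Chars.replace.go, String.ext_iff]

theorem pvR5 (w : String) : PySem.Str.replace "time for {}" "{}" w = "time for " ++ w := by
  simp [PySem.Str.replace, PySem.Chars.replace, PySem.Chars.replace.go, String.ext_iff]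

theorem pvR6 (w : String) : PySem.Str.replace "duration of {}" "{}" w = "duration of " ++ w := by
  simp [PySem.Str.replace, PySem.Chars.replace, PySem.Chars.replace.go, String.ext_iff]

theorem pvR7 (w : String) : PySem.Str.replace "{} coverage" "{}" w = w ++ " coverage" := by
  simp [PySem.Str.replace, PySem.Chars.replace, PySem.Chars.replace.go, String.ext_iff]

theorem pvR8 (w : String) : PySem.Str.replace "{} benefits" "{}" w = w ++ " benefits" := by
  simp [PySem.Str.replace, PySem.Chars.replace, PySem.Chars.replace.go, String.ext_iff]

theorem pvR9 (w : String) : PySem.Str.replace "{} included" "{}" w = w ++ " included" := by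
  simp [PySem.Str.replace, PySem.Chars.replace, PySem.Chars.replace.go, String.ext_iff]

theorem pvR10 (w : String) : PySem.Str.replace "covered {}" "{}" w = "covered " ++ w := by
  simp [PySem.Str.replace, PySem.Chars.replace, PySem.Chars.replace.go, String.ext_iff]

theorem pvR11 (w : String) : PySem.Str.replace "{} eligible" "{}" w = w ++ " eligible" := by
  simp [PySem.Str.replace, PySem.Chars.replace, PySem.Chars.replace.go, String.ext_iff]

theorem pvR12 (w : String) : PySem.Str.replace "{} qualification" "{}" w = w ++ " qualification" := by
  simp [PySem.Str.replace, PySem.Chars.replace, PySem.Chars.replace.go, String.ext_iff]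

theorem pvR13 (w : String) : PySem.Str.replace "{} exclusion" "{}" w = w ++ " exclusion" := by
  simp [PySem.Str.replace, PySem.Chars.replace, PySem.Chars.replace.go, String.ext_iff]

theorem pvR14 (w : String) : PySem.Str.replace "{} limitation" "{}" w = w ++ " limitation" := by
  simp [PySem.Str.replace, PySem.Chars.replace, PySem.Chars.replace.go, String.ext_iff]

theorem pvR15 (w : String) : PySem.Str.replace "{} restriction" "{}" w = w ++ " restriction" := by
  simp [PySem.Str.replace, PySem.Chars.replace, PySem.Chars.replace.go, String.ext_iff]

theorem pvR16 (w : String) : PySem.Str.replace "excluded {}" "{}" w = "excluded " ++ w := by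
  simp [PySem.Str.replace, PySem.Chars.replace, PySem.Chars.replace.go, String.ext_iff]

theorem pvR17 (w : String) : PySem.Str.replace "{} not covered" "{}" w = w ++ " not covered" := by
  simp [PySem.Str.replace, PySem.Chars.replace, PySem.Chars.replace.go, String.ext_iff]

theorem pvR18 (w : String) : PySem.Str.replace "{} restrictions" "{}" w = w ++ " restrictions" := by
  simp [PySem.Str.replace, PySem.Chars.replace, PySem.Chars.replace.go, String.ext_iff]

theorem pvR19 (w : String) : PySem.Str.replace "{} cost" "{}" w = w ++ " cost" := by
  simp [PySem.Str.replace, PySem.Chars.replace, PySem.Chars.replace.go, String.ext_iff]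

theorem pvR20 (w : String) : PySem.Str.replace "{} price" "{}" w = w ++ " price" := by
  simp [PySem.Str.replace, PySem.Chars.replace, PySem.Chars.replace.go, String.ext_iff]

theorem pvR21 (w : String) : PySem.Str.replace "{} amount" "{}" w = w ++ " amount" := by
  simp [PySem.Str.replace, PySem.Chars.replace, PySem.Chars.replace.go, String.ext_iff]

theorem pvR22 (w : String) : PySem.Str.replace "{} fee" "{}" w = w ++ " fee" := by
  simp [PySem.Str.replace, PySem.Chars.replace, PySem.Chars.replace.go, String.ext_iff]

theorem pvR23 (w : String) : PySem.Str.replace "cost of {}" "{}" w = "cost of " ++ w := by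
  simp [PySem.Str.replace, PySem.Chars.replace, PySem.Chars.replace.go, String.ext_iff]

theorem pvR24 (w : String) : PySem.Str.replace "amount for {}" "{}" w = "amount for " ++ w := by
  simp [PySem.Str.replace, PySem.Chars.replace, PySem.Chars.replace.go, String.ext_iff]

theorem pvR25 (w : String) : PySem.Str.replace "{} process" "{}" w = w ++ " process" := by
  simp [PySem.Str.replace, PySem.Chars.replace, PySem.Chars.replace.go, String.ext_iff]

theorem pvR26 (w : String) : PySem.Str.replace "{} procedure" "{}" w = w ++ " procedure" := by
  simp [PySem.Str.replace, PySem.Chars.replace, PySem.Chars.replace.go, String.ext_iff]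

theorem pvR27 (w : String) : PySem.Str.replace "{} method" "{}" w = w ++ " method" := by
  simp [PySem.Str.replace, PySem.Chars.replace, PySem.Chars.replace.go, String.ext_iff]

theorem pvR28 (w : String) : PySem.Str.replace "how to {}" "{}" w = "how to " ++ w := by
  simp [PySem.Str.replace, PySem.Chars.replace, PySem.Chars.replace.go, String.ext_iff]

theorem pvR29 (w : String) : PySem.Str.replace "{} steps" "{}" w = w ++ " steps" := by
  simp [PySem.Str.replace, PySem.Chars.replace, PySem.Chars.replace.go, String.ext_iff]

theorem pvR30 (w : String) : PySem.Str.replace "process for {}" "{}" w = "process for " ++ w := by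
  simp [PySem.Str.replace, PySem.Chars.replace, PySem.Chars.replace.go, String.ext_iff]

theorem pvR31 (w : String) : PySem.Str.replace "{} requirements" "{}" w = w ++ " requirements" := by
  simp [PySem.Str.replace, PySem.Chars.replace, PySem.Chars.replace.go, String.ext_iff]

theorem pvR32 (w : String) : PySem.Str.replace "{} conditions" "{}" w = w ++ " conditions" := by
  simp [PySem.Str.replace, PySem.Chars.replace, PySem.Chars.replace.go, String.ext_iff]

theorem pvR33 (w : String) : PySem.Str.replace "{} criteria" "{}" w = w ++ " criteria" := by
  simp [PySem.Str.replace, PySem.Chars.replace, PySem.Chars.replace.go, String.ext_iff]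

theorem pvR34 (w : String) : PySem.Str.replace "required {}" "{}" w = "required " ++ w := by
  simp [PySem.Str.replace, PySem.Chars.replace, PySem.Chars.replace.go, String.ext_iff]

theorem pvR35 (w : String) : PySem.Str.replace "{} needed" "{}" w = w ++ " needed" := by
  simp [PySem.Str.replace, PySem.Chars.replace, PySem.Chars.replace.go, String.ext_iff]

theorem pvR36 (w : String) : PySem.Str.replace "conditions for {}" "{}" w = "conditions for " ++ w := by
  simp [PySem.Str.replace, PySem.Chars.replace, PySem.Chars.replace.go, String.ext_iff]

theorem pvIteA (c : Bool) (p x : List String) : (if c = true then p ++ x else p) = p ++ (if c = true then x else []) := by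
  cases c <;> simp

theorem pvIteB (c : Bool) (x r : List String) : (if (!c) = true then r else x ++ r) = (if c = true then x else []) ++ r := by
  cases c <;> simp

-- ===== VERDICT (by name: the statement is the Claim_ definition above) =====
theorem generate_context_expansions_py_spec : Claim_equal_generate_context_expansions_py := by
  intro q ws _
  unfold Spec_generate_context_expansions_py
  simp only [generate_context_expansions_py, generate_context_expansions_py_alt, pvRules,
    pvExpand, PySem.List.foldl_append_eq_flatMap, List.map_cons, List.map_nil,
    pvR1, pvR2, pvR3, pvR4, pvR5, pvR6, pvR7, pvR8, pvR9, pvR10, pvR11, pvR12, pvR13, pvR14, pvR15, pvR16, pvR17, pvR18, pvR19, pvR20, pvR21, pvR22, pvR23, pvR24, pvR25, pvR26, pvR27, pvR28, pvR29, pvR30, pvR31, pvR32, pvR33, pvR34, pvR35, pvR36]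
  simp only [pvIteA, pvIteB]
  simp only [List.append_assoc, List.nil_append, List.append_nil]
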